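-- pv_equiv track=rewrite | github.com/dryeab/competitive-programming | codeforces/C_Constanze_s_Machine.py | solve
-- ===== SOURCE A (Python) =====
-- def solve(s):
--
--     one, two = 1, 1
--
--     if s[0] in ['w', 'm']:
--         return 0
--
--     for i in range(1, len(s)):
--         if s[i] == 'w' or s[i] == 'm':
--             return 0
--         three = two
--         if s[i] in ['u', 'n'] and s[i-1] == s[i]:
--             three += one
--         one, two = two, three
--         two %= 10**9 + 7
--
--     return two
-- ===== SOURCE B (Python) =====
-- def solve(s):
--     MOD = 10 ** 9 + 7
--     if 'w' in s or 'm' in s: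
--         return 0
--     res = 1
--     i, n = 0, len(s)
--     while i < n:
--         j = i
--         if s[i] in ('u', 'n'):
--             while j + 1 < n and s[j + 1] == s[i]:
--                 j += 1
--             res = res * fib(j - i + 1) % MOD
--         i = j + 1
--     return res
--
--
-- def fib(m):
--     a, b = 1, 1
--     for _ in range(m):
--         a, b = b, a + b
--     return a
-- ===== Notes on version B (the rewrite author's own statement) =====
-- stated objective: alternative
-- what changed: B replaces A's character-by-character two-variable DP with a scan that splits the string into maximal runs of equal doublable letters and multiplies one per-run Fibonacci factor (computed by a separate iterative helper), after a single up-front membership check for the forbidden letters; it does less work per character (no per-character modulo).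
import Mathlib
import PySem

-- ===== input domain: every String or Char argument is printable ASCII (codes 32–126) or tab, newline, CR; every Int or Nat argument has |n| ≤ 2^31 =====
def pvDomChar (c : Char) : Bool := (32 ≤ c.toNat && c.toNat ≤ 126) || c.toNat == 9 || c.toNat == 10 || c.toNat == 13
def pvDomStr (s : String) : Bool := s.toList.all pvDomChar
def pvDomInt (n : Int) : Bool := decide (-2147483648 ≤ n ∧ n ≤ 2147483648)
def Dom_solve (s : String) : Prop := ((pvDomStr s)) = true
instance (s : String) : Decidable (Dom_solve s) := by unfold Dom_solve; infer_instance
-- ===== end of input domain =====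

-- B factors the count into a product, over maximal runs of equal doublable characters,
-- of iteratively computed Fibonacci numbers, instead of A's single character-by-character DP
-- (objective: alternative).

-- ===== PORT A =====
-- A's for-loop over i in range(1, len(s)) with state (one, two); the recursion carries
-- prev = s[i-1] and the same state, branches in A's order.
def solveLoopA (prev : Char) (cs : List Char) (one two : Int) : Int :=
  match cs with
  | [] => two
  | c :: rest =>
    if c = 'w' ∨ c = 'm' then 0
    else
      let three := two + (if (c = 'u' ∨ c = 'n') ∧ prev = c then one else 0)
      solveLoopA c rest two (three % 1000000007)

def solve (s : String) : Int :=
  match s.toList with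
  | [] => 0  -- s[0] raises IndexError in Python; excluded by Pre_solve
  | c :: rest => if c = 'w' ∨ c = 'm' then 0 else solveLoopA c rest 1 1

-- ===== PORT B =====
-- Source B's fib: a, b = 1, 1; m times a, b = b, a + b; return a
def fibLoopB : Nat → Int → Int → Int
  | 0, a, _ => a
  | m + 1, a, b => fibLoopB m b (a + b)

def fibB (m : Nat) : Int := fibLoopB m 1 1

-- Source B's while-loop over maximal runs: a run of k+1 equal 'u'/'n' chars contributes fib(k+1).
def runsLoopB (cs : List Char) (res : Int) : Int :=
  match cs with
  | [] => res
  | c :: rest =>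
    if c = 'u' ∨ c = 'n' then
      let k := (rest.takeWhile (· == c)).length
      runsLoopB (rest.drop k) (res * fibB (k + 1) % 1000000007)
    else runsLoopB rest res
termination_by cs.length
decreasing_by
  · simpa using Nat.lt_succ_of_le (Nat.le_trans (List.length_drop_le _ _) (Nat.le_refl _))
  · simp

def solve_alt (s : String) : Int :=
  if s.toList.contains 'w' || s.toList.contains 'm' then 0
  else runsLoopB s.toList 1

-- ===== PRECONDITION & SPEC =====
-- Pre_solve excludes only the empty string, on which A raises IndexError at s[0].
def Pre_solve (s : String) : Prop := s ≠ ""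
instance (s : String) : Decidable (Pre_solve s) := by unfold Pre_solve; infer_instance
def pvWitness_solve : String := "unuu"

def Spec_solve (s : String) (out : Int) : Prop := out = solve_alt s
instance (s : String) (out : Int) : Decidable (Spec_solve s out) := by unfold Spec_solve; infer_instance

-- ===== CLAIM (what is proved, stated in full; the proofs are below) =====
def Claim_equal_solve : Prop := ∀ (s : String), Dom_solve s → Pre_solve s → Spec_solve s (solve s)

-- ===== LEMMAS AND PROOFS =====

-- Pure (mod-free) version of A's loop, proof-side only.
def solveLoopP (prev : Char) (cs : List Char) (one two : Int) : Int :=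
  match cs with
  | [] => two
  | c :: rest =>
    if c = 'w' ∨ c = 'm' then 0
    else
      let three := two + (if (c = 'u' ∨ c = 'n') ∧ prev = c then one else 0)
      solveLoopP c rest two three

-- Pure product over runs, proof-side only (same run split as runsLoopB, no mod, no accumulator).
def prodRunsP : List Char → Int
  | [] => 1
  | c :: rest =>
    if c = 'u' ∨ c = 'n' then
      let k := (rest.takeWhile (· == c)).length
      fibB (k + 1) * prodRunsP (rest.drop k)
    else prodRunsP rest
termination_by cs => cs.length
decreasing_by
  · simpa using Nat.lt_succ_of_le (Nat.le_trans (List.length_drop_le _ _) (Nat.le_refl _))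
  · simp

theorem fibLoopB_mul (k : Nat) : ∀ a b c : Int,
    fibLoopB k (c * a) (c * b) = c * fibLoopB k a b := by
  induction k with
  | zero => intro a b c; rfl
  | succ k ih =>
      intro a b c
      show fibLoopB k (c * b) (c * a + c * b) = c * fibLoopB k b (a + b)
      rw [← mul_add, ih]

theorem fibB_succ_smul (k : Nat) (b : Int) :
    fibLoopB (k + 1) b b = b * fibB (k + 1) := by
  have := fibLoopB_mul (k + 1) 1 1 b
  simpa [fibB] using this

-- A's loop within a run of k copies of c ∈ {u,n}: the state moves as a Fibonacci pair.
theorem solveLoopP_replicate (k : Nat) (c : Char) (hc : c = 'u' ∨ c = 'n') :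
    ∀ (rest : List Char) (a b : Int),
    solveLoopP c (List.replicate k c ++ rest) a b
      = solveLoopP c rest (fibLoopB k a b) (fibLoopB (k + 1) a b) := by
  induction k with
  | zero =>
      intro rest a b
      simp [fibLoopB]
  | succ k ih =>
      intro rest a b
      have hwm : ¬ (c = 'w' ∨ c = 'm') := by
        rcases hc with h | h <;> subst h <;> decide
      have hcond : (c = 'u' ∨ c = 'n') ∧ c = c := ⟨hc, rfl⟩
      show (if c = 'w' ∨ c = 'm' then 0
            else solveLoopP c (List.replicate k c ++ rest) b
              (b + if (c = 'u' ∨ c = 'n') ∧ c = c then a else 0))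
          = solveLoopP c rest (fibLoopB (k + 1) a b) (fibLoopB (k + 1 + 1) a b)
      rw [if_neg hwm, if_pos hcond, Int.add_comm b a, ih]
      rfl

theorem takeWhile_append_drop_self (p : Char → Bool) (l : List Char) :
    l = l.takeWhile p ++ l.drop (l.takeWhile p).length := by
  induction l with
  | nil => rfl
  | cons x xs ih =>
      rw [List.takeWhile_cons]
      by_cases h : p x = true
      · rw [if_pos h, List.length_cons, List.drop_succ_cons, List.cons_append]
        exact congrArg (x :: ·) ih
      · rw [if_neg h]
        rfl

-- Freshness: the head of cs does not extend a run ending in prev.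
def FreshP (prev : Char) (cs : List Char) : Prop :=
  ∀ d, cs.head? = some d → ¬ ((d = 'u' ∨ d = 'n') ∧ prev = d)

theorem takeWhile_beq_replicate (c : Char) (l : List Char) :
    l.takeWhile (· == c) = List.replicate (l.takeWhile (· == c)).length c := by
  induction l with
  | nil => rfl
  | cons x xs ih =>
      rw [List.takeWhile_cons]
      by_cases h : (x == c) = true
      · have hx : x = c := by simpa using h
        subst hx
        rw [if_pos h, List.length_cons, List.replicate_succ, ih, List.length_replicate]
      · rw [if_neg h]
        rfl

theorem drop_takeWhile_head (c : Char) (l : List Char) :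
    ∀ d, (l.drop (l.takeWhile (· == c)).length).head? = some d → d ≠ c := by
  induction l with
  | nil => intro d h; simp at h
  | cons x xs ih =>
      intro d h
      rw [List.takeWhile_cons] at h
      by_cases hx : (x == c) = true
      · rw [if_pos hx, List.length_cons, List.drop_succ_cons] at h
        exact ih d h
      · rw [if_neg hx] at h
        simp only [List.length_nil, List.drop_zero, List.head?_cons, Option.some.injEq] at h
        subst h
        simpa using hx

-- Main pure lemma: from a fresh boundary, A's pure DP multiplies `b` by the run product.
theorem solveLoopP_fresh (n : Nat) : ∀ (cs : List Char), cs.length ≤ n →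
    ∀ (prev : Char) (a b : Int),
    ('w' ∉ cs) → ('m' ∉ cs) → FreshP prev cs →
    solveLoopP prev cs a b = b * prodRunsP cs := by
  induction n with
  | zero =>
      intro cs hlen prev a b _ _ _
      have : cs = [] := List.eq_nil_of_length_eq_zero (Nat.le_zero.mp hlen)
      subst this; simp [solveLoopP, prodRunsP]
  | succ n ih =>
      intro cs hlen prev a b hw hm hfresh
      match cs with
      | [] => simp [solveLoopP, prodRunsP]
      | c :: rest =>
        have hcw : c ≠ 'w' := fun h => hw (h ▸ List.mem_cons_self ..)
        have hcm : c ≠ 'm' := fun h => hm (h ▸ List.mem_cons_self ..)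
        have hrw : 'w' ∉ rest := fun h => hw (List.mem_cons_of_mem _ h)
        have hrm : 'm' ∉ rest := fun h => hm (List.mem_cons_of_mem _ h)
        have hwm : ¬ (c = 'w' ∨ c = 'm') := by rintro (h | h) <;> [exact hcw h; exact hcm h]
        have hnoext : ¬ ((c = 'u' ∨ c = 'n') ∧ prev = c) := hfresh c rfl
        have hlen' : rest.length ≤ n := Nat.le_of_succ_le_succ (by simpa using hlen)
        by_cases hc : c = 'u' ∨ c = 'n'
        · -- c starts a run
          set k := (rest.takeWhile (· == c)).length with hk
          have hsplit : rest = List.replicate k c ++ rest.drop k := by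
            conv_lhs => rw [takeWhile_append_drop_self (· == c) rest]
            rw [takeWhile_beq_replicate]
            simp [← hk]
          have hdroplen : (rest.drop k).length ≤ n :=
            Nat.le_trans (by simpa using List.length_drop_le k rest) hlen'
          have hdw : 'w' ∉ rest.drop k := fun h => hrw (List.mem_of_mem_drop h)
          have hdm : 'm' ∉ rest.drop k := fun h => hrm (List.mem_of_mem_drop h)
          have hdfresh : FreshP c (rest.drop k) := by
            intro d hd hcontra
            exact drop_takeWhile_head c rest d hd (hcontra.2.symm)
          simp only [solveLoopP, if_neg hwm, if_neg hnoext, add_zero]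
          conv_lhs => rw [hsplit]
          rw [solveLoopP_replicate k c hc, ih (rest.drop k) hdroplen c _ _ hdw hdm hdfresh,
            fibB_succ_smul]
          show b * fibB (k + 1) * prodRunsP (rest.drop k)
            = b * prodRunsP (c :: rest)
          rw [prodRunsP, if_pos hc]
          ring
        · -- c contributes no run
          have hfresh' : FreshP c rest := by
            intro d hd hcontra
            -- any head of rest equal to c would be u/n, contradicting hc
            exact hc (hcontra.2 ▸ hcontra.1)
          simp only [solveLoopP, if_neg hwm, if_neg hnoext, add_zero]
          rw [ih rest hlen' c b b hrw hrm hfresh']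
          rw [prodRunsP, if_neg hc]

-- w/m anywhere in the pure loop's input forces 0.
theorem solveLoopP_zero (cs : List Char) : ∀ (prev : Char) (a b : Int),
    ('w' ∈ cs ∨ 'm' ∈ cs) → solveLoopP prev cs a b = 0 := by
  induction cs with
  | nil => intro _ _ _ h; simp at h
  | cons c rest ih =>
      intro prev a b h
      by_cases hwm : c = 'w' ∨ c = 'm'
      · simp [solveLoopP, hwm]
      · have h' : 'w' ∈ rest ∨ 'm' ∈ rest := by
          rcases h with h | h <;> rcases List.mem_cons.mp h with h | h
          · exact absurd (Or.inl h.symm) hwm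
          · exact Or.inl h
          · exact absurd (Or.inr h.symm) hwm
          · exact Or.inr h
        simp only [solveLoopP, if_neg hwm]
        exact ih _ _ _ h'

-- The modded A-loop equals the pure A-loop reduced mod p, given congruent in-range state.
theorem solveLoopA_mod (cs : List Char) : ∀ (prev : Char) (a a' b b' : Int),
    a % 1000000007 = a' % 1000000007 → b % 1000000007 = b' % 1000000007 →
    0 ≤ b → b < 1000000007 →
    solveLoopA prev cs a b = solveLoopP prev cs a' b' % 1000000007 := by
  induction cs with
  | nil =>
      intro prev a a' b b' _ hb hb0 hb1
      show b = b' % 1000000007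
      rw [← hb, Int.emod_eq_of_lt hb0 hb1]
  | cons c rest ih =>
      intro prev a a' b b' ha hb hb0 hb1
      by_cases hwm : c = 'w' ∨ c = 'm'
      · simp [solveLoopA, solveLoopP, hwm]
      · simp only [solveLoopA, solveLoopP, if_neg hwm]
        set x : Int := if (c = 'u' ∨ c = 'n') ∧ prev = c then a else 0 with hx
        set x' : Int := if (c = 'u' ∨ c = 'n') ∧ prev = c then a' else 0 with hx'
        have hxm : x % 1000000007 = x' % 1000000007 := by
          rw [hx, hx']; split_ifs
          · exact ha
          · rfl
        apply ih c b b' ((b + x) % 1000000007) (b' + x') hb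
        · rw [Int.emod_emod_of_dvd _ dvd_rfl, Int.add_emod, hb, hxm, ← Int.add_emod]
        · exact Int.emod_nonneg _ (by decide)
        · exact Int.emod_lt_of_pos _ (by decide)

-- The modded B-loop equals the accumulator times the pure run product, reduced mod p.
theorem runsLoopB_mod (n : Nat) : ∀ (cs : List Char), cs.length ≤ n → ∀ (res : Int),
    0 ≤ res → res < 1000000007 →
    runsLoopB cs res = res * prodRunsP cs % 1000000007 := by
  induction n with
  | zero =>
      intro cs hlen res h0 h1
      have : cs = [] := List.eq_nil_of_length_eq_zero (Nat.le_zero.mp hlen)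
      subst this
      simp only [runsLoopB, prodRunsP, mul_one]
      exact (Int.emod_eq_of_lt h0 h1).symm
  | succ n ih =>
      intro cs hlen res h0 h1
      match cs with
      | [] =>
        simp only [runsLoopB, prodRunsP, mul_one]
        exact (Int.emod_eq_of_lt h0 h1).symm
      | c :: rest =>
        have hlen' : rest.length ≤ n := Nat.le_of_succ_le_succ (by simpa using hlen)
        by_cases hc : c = 'u' ∨ c = 'n'
        · set k := (rest.takeWhile (· == c)).length with hk
          have hdroplen : (rest.drop k).length ≤ n :=
            Nat.le_trans (by simpa using List.length_drop_le k rest) hlen'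
          rw [runsLoopB, if_pos hc, prodRunsP, if_pos hc,
            ih (rest.drop k) hdroplen _ (Int.emod_nonneg _ (by decide))
              (Int.emod_lt_of_pos _ (by decide))]
          rw [← hk]
          conv_lhs => rw [Int.mul_emod, Int.emod_emod_of_dvd _ dvd_rfl, ← Int.mul_emod]
          rw [mul_assoc]
        · rw [runsLoopB, if_neg hc, prodRunsP, if_neg hc, ih rest hlen' res h0 h1]

theorem string_ne_empty_toList {s : String} (h : s ≠ "") : s.toList ≠ [] := by
  intro hnil
  exact h (String.toList_injective (by simp [hnil]))

-- ===== VERDICT (by name: the statement is the Claim_ definition above) =====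
theorem solve_spec : Claim_equal_solve := by
  intro s _ hpre
  show solve s = solve_alt s
  match hcs : s.toList with
  | [] => exact absurd hcs (string_ne_empty_toList hpre)
  | c :: rest =>
    simp only [solve, solve_alt, hcs]
    by_cases hwm : c = 'w' ∨ c = 'm'
    · have hmem : ((c :: rest).contains 'w' || (c :: rest).contains 'm') = true := by
        rcases hwm with h | h <;> subst h <;> simp
      rw [if_pos hwm, if_pos hmem]
    · have hcw : c ≠ 'w' := fun h => hwm (Or.inl h)
      have hcm : c ≠ 'm' := fun h => hwm (Or.inr h)
      by_cases hrest : 'w' ∈ rest ∨ 'm' ∈ rest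
      · -- w/m later: both 0
        have hcont : (((c :: rest).contains 'w' || (c :: rest).contains 'm')) = true := by
          rcases hrest with h | h <;> simp [List.contains_eq_mem, h]
        rw [if_neg hwm, if_pos hcont,
          solveLoopA_mod rest c 1 1 1 1 rfl rfl (by decide) (by decide),
          solveLoopP_zero rest c 1 1 hrest]
        decide
      · -- no w/m anywhere
        push_neg at hrest
        have hw : 'w' ∉ (c :: rest) := by
          intro h; rcases List.mem_cons.mp h with h | h
          · exact hcw h.symm
          · exact hrest.1 h
        have hm : 'm' ∉ (c :: rest) := by
          intro h; rcases List.mem_cons.mp h with h | h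
          · exact hcm h.symm
          · exact hrest.2 h
        have hcont : ((c :: rest).contains 'w' || (c :: rest).contains 'm') = false := by
          simp only [List.contains_eq_mem, Bool.or_eq_false_iff, decide_eq_false_iff_not]
          exact ⟨hw, hm⟩
        rw [if_neg hwm, if_neg (by rw [hcont]; decide),
          runsLoopB_mod (c :: rest).length (c :: rest) le_rfl 1 (by decide) (by decide),
          solveLoopA_mod rest c 1 1 1 1 rfl rfl (by decide) (by decide), one_mul]
        congr 1
        -- pure equality: solveLoopP c rest 1 1 = prodRunsP (c :: rest)
        by_cases hc : c = 'u' ∨ c = 'n'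
        · set k := (rest.takeWhile (· == c)).length with hk
          have hsplit : rest = List.replicate k c ++ rest.drop k := by
            conv_lhs => rw [takeWhile_append_drop_self (· == c) rest]
            rw [takeWhile_beq_replicate]
            simp [← hk]
          have hdw : 'w' ∉ rest.drop k := fun h => hrest.1 (List.mem_of_mem_drop h)
          have hdm : 'm' ∉ rest.drop k := fun h => hrest.2 (List.mem_of_mem_drop h)
          have hdfresh : FreshP c (rest.drop k) := by
            intro d hd hcontra
            exact drop_takeWhile_head c rest d hd (hcontra.2.symm)
          conv_lhs => rw [hsplit]
          rw [solveLoopP_replicate k c hc,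
            solveLoopP_fresh (rest.drop k).length (rest.drop k) le_rfl c _ _ hdw hdm hdfresh,
            fibB_succ_smul, prodRunsP, if_pos hc]
          ring
        · have hfresh : FreshP c rest := by
            intro d hd hcontra
            exact hc (hcontra.2 ▸ hcontra.1)
          rw [solveLoopP_fresh rest.length rest le_rfl c 1 1 hrest.1 hrest.2 hfresh,
            prodRunsP, if_neg hc, one_mul]
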